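-- pv_equiv track=rewrite | github.com/RRisto/learning | algorithms_learn/what_can_be_computed/src/utils.py | nextShortLex
-- ===== SOURCE A (Python) =====
-- def nextShortLex(s, alphabet):
--     """Return the next string in shortlex ordering on a given alphabet.
--
--     Shortlex is an ordering that lists strings according to length,
--     with strings of the same length being ordered
--     lexicographically. This function takes a string on some particular
--     alphabet as input, and returns the next string on that alphabet in
--     the shortlex ordering.
--
--     Args:
--
--         s (str): The string whose successor will be returned.
--
--         alphabet (list of characters): A list of characters in the
--             alphabet to be used.
--
--     Returns:
--
--         str: The successor of s in the shortlex ordering, assuming the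
--             given alphabet.
--
--     Example:
--
--         >>> nextShortLex('aab', ['a', 'b', 'c'])
--         'aac'
--         >>> nextShortLex('ccc', ['a', 'b', 'c'])
--         'aaaa'
--     """
--
--     first = alphabet[0]
--     last = alphabet[-1]
--     if s=='': return str(first)
--     chars = [c for c in s]
--     L = len(chars)
--     # The Boolean variable overflow will indicate whether or not this
--     # is the last string of the current length (and hence whether we
--     # need to "overflow" to the first string with length one greater)
--     overflow = True
--     for i in range(L-1,-1,-1):
--         currentChar = chars[i]
--         if currentChar != last:
--             overflow = False
--             break
--     # Either we overflowed (and i=0), or we didn't overflow, in which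
--     # case the value of i is now the index of the rightmost character
--     # that can be incremented. Let's remember all the needed
--     # information about that character.
--     incrementIndex = i
--     incrementChar = currentChar
--     alphabetIndex = alphabet.index(currentChar)
--
--     if overflow:
--         # Treat overflow as a special case and return a string of
--         # length L+1 consisting entirely of the first character in the
--         # alphabet.
--         return first*(L+1)
--     else:
--         # We didn't overflow, so manipulate the array of characters to
--         # produce the next string in lexicographic order. The
--         # rightmost character that can be incremented gets
--         # incremented...
--         chars[incrementIndex] = alphabet[alphabetIndex+1]
--         # ...then all the characters to the right of that roll over to
--         # the first character in the alphabet.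
--         for j in range(incrementIndex+1,L):
--             chars[j]=first
--         return ''.join(chars)
-- ===== SOURCE B (Python) =====
-- def nextShortLex(s, alphabet):
--     """Next string in shortlex order, as a recursive carry on the last character."""
--     if s == '':
--         return str(alphabet[0])
--     c = s[-1]
--     if c != alphabet[-1]:
--         return s[:-1] + alphabet[alphabet.index(c) + 1]
--     return nextShortLex(s[:-1], alphabet) + alphabet[0]
-- ===== Notes on version B (the rewrite author's own statement) =====
-- stated objective: simpler
-- what changed: Replaces A's index-based backwards scan with an overflow flag, in-place character increment and rollover loop by a short recursive carry on the last character (base case: empty string yields alphabet[0]).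
-- outside the precondition, e.g. on nextShortLex('b', []): A raises IndexError, B raises IndexError; on nextShortLex('z', ['a', 'b']): A raises ValueError, B raises ValueError
import Mathlib
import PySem

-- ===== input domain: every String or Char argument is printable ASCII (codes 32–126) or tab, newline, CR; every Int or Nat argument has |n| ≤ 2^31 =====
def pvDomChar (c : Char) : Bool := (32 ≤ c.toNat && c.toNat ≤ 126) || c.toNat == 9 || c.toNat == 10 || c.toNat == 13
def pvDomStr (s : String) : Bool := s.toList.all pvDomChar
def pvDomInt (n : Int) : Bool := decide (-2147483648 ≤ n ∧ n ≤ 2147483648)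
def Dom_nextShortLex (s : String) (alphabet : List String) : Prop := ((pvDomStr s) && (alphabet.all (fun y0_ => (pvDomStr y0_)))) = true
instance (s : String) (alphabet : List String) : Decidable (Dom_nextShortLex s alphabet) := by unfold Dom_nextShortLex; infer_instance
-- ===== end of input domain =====

-- B replaces A's index-based backwards scan + in-place increment/rollover by a short
-- recursive carry on the last character (objective: simpler; same asymptotic cost).

-- ===== PORT A =====
-- the loop `for i in range(L-1,-1,-1): … if currentChar != last: overflow=False; break`,
-- returning the leftover (overflow, i, currentChar); argument k+1 means current index i = k
def pvAScan (chars : List String) (last : String) : Nat → Bool × Nat × String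
  | 0 => (true, 0, "")            -- never reached from nextShortLex (L ≥ 1)
  | k+1 =>
    let c := chars.getD k ""
    if c ≠ last then (false, k, c)
    else if k = 0 then (true, 0, c)     -- loop exhausted: leftover i = 0, currentChar = chars[0]
    else pvAScan chars last k

def nextShortLex (s : String) (alphabet : List String) : String :=
  let first := PySem.List.pyGetD alphabet 0 ""          -- alphabet[0]; Pre_ excludes the IndexError ([] case)
  let last := PySem.List.pyGetD alphabet (-1) ""        -- alphabet[-1]
  if s = "" then first
  else
    let chars := s.toList.map (fun c => String.singleton c)   -- [c for c in s]
    let L := chars.length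
    let r := pvAScan chars last L
    let overflow := r.1
    let incrementIndex := r.2.1
    let currentChar := r.2.2
    -- alphabet.index(currentChar); Pre_ excludes the ValueError (currentChar ∉ alphabet) case
    let alphabetIndex := (PySem.List.index? alphabet currentChar).getD 0
    if overflow then String.join (List.replicate (L+1) first)     -- first*(L+1)
    else
      let chars1 := chars.set incrementIndex (PySem.List.pyGetD alphabet ((alphabetIndex+1 : Nat) : Int) "")
      -- for j in range(incrementIndex+1, L): chars[j] = first
      let chars2 := (List.range' (incrementIndex+1) (L - (incrementIndex+1))).foldl
        (fun cs j => cs.set j first) chars1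
      String.join chars2                                          -- ''.join(chars)

-- ===== PORT B =====
-- recursive carry over the string read from the right end (B's recursion on s[:-1])
def pvBGo (alphabet : List String) : List Char → String
  | [] => PySem.List.pyGetD alphabet 0 ""               -- str(alphabet[0])
  | c :: rest =>
    if String.singleton c ≠ PySem.List.pyGetD alphabet (-1) "" then
      String.ofList rest.reverse ++
        PySem.List.pyGetD alphabet
          ((((PySem.List.index? alphabet (String.singleton c)).getD 0) + 1 : Nat) : Int) ""
    else
      pvBGo alphabet rest ++ PySem.List.pyGetD alphabet 0 ""

def nextShortLex_alt (s : String) (alphabet : List String) : String :=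
  pvBGo alphabet s.toList.reverse

-- ===== PRECONDITION & SPEC =====
-- Pre_ excludes exactly where the Python A raises: an empty alphabet (IndexError on alphabet[0]),
-- and a string whose rightmost character differing from alphabet[-1] is not itself in the
-- alphabet (ValueError from alphabet.index).
def Pre_nextShortLex (s : String) (alphabet : List String) : Prop :=
  alphabet ≠ [] ∧
  ((s.toList.reverse.dropWhile
      (fun c => String.singleton c == PySem.List.pyGetD alphabet (-1) "")).head?.all
    (fun c => alphabet.contains (String.singleton c))) = true
instance (s : String) (alphabet : List String) : Decidable (Pre_nextShortLex s alphabet) := by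
  unfold Pre_nextShortLex; infer_instance

def pvWitness_nextShortLex : String × List String := ("acc", ["a", "b", "c"])

def Spec_nextShortLex (s : String) (alphabet : List String) (out : String) : Prop := out = nextShortLex_alt s alphabet
instance (s : String) (alphabet : List String) (out : String) : Decidable (Spec_nextShortLex s alphabet out) := by unfold Spec_nextShortLex; infer_instance

-- ===== CLAIM (what is proved, stated in full; the proofs are below) =====
def Claim_equal_nextShortLex : Prop := ∀ (s : String) (alphabet : List String), Dom_nextShortLex s alphabet → Pre_nextShortLex s alphabet → Spec_nextShortLex s alphabet (nextShortLex s alphabet)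

-- ===== LEMMAS AND PROOFS =====

theorem pv_join_acc (b : List String) : ∀ acc : String, b.foldl (· ++ ·) acc = acc ++ String.join b := by
  induction b with
  | nil => intro acc; simp only [List.foldl_nil, String.join]; exact String.append_empty.symm
  | cons x t ih =>
    intro acc
    have hR : String.join (x :: t) = x ++ String.join t := by
      show t.foldl (· ++ ·) ("" ++ x) = x ++ String.join t
      rw [ih ("" ++ x), String.empty_append]
    show t.foldl (· ++ ·) (acc ++ x) = acc ++ String.join (x :: t)
    rw [ih (acc ++ x), hR, String.append_assoc]

theorem pv_join_append (a b : List String) : String.join (a ++ b) = String.join a ++ String.join b := by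
  simp only [String.join, List.foldl_append]
  exact pv_join_acc b _

theorem pv_join_singletons (l : List Char) : String.join (l.map String.singleton) = String.ofList l := by
  induction l with
  | nil => simp [String.join]
  | cons c t ih =>
    have h : ((c :: t).map String.singleton) = [String.singleton c] ++ t.map String.singleton := by simp
    have h1 : String.join [String.singleton c] = String.singleton c := by
      simp only [String.join, List.foldl_cons, List.foldl_nil]; exact String.empty_append
    rw [h, pv_join_append, ih, h1, String.singleton_eq_ofList, ← String.ofList_append]
    rfl

theorem pv_join_snoc (a : List String) (v : String) : String.join (a ++ [v]) = String.join a ++ v := by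
  rw [pv_join_append]; simp [String.join]

-- pvAScan only inspects indices below its counter
theorem pvAScan_append (a b : List String) (last : String) :
    ∀ k, k ≤ a.length → pvAScan (a ++ b) last k = pvAScan a last k := by
  intro k
  induction k with
  | zero => intro _; rfl
  | succ m ih =>
    intro hm
    have hg : (a ++ b).getD m "" = a.getD m "" := by
      have hlt : m < a.length := hm
      simp [List.getD_eq_getElem?_getD, List.getElem?_append_left hlt]
    simp only [pvAScan, hg]
    split
    · rfl
    · split
      · rfl
      · exact ih (Nat.le_of_succ_le hm)

-- a non-overflow scan result: index below the counter, character is the one at that index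
theorem pvAScan_false (chars : List String) (last : String) :
    ∀ k i c, pvAScan chars last k = (false, i, c) → i < k ∧ c = chars.getD i "" ∧ c ≠ last := by
  intro k
  induction k with
  | zero => intro i c h; simp [pvAScan] at h
  | succ m ih =>
    intro i c h
    simp only [pvAScan] at h
    split at h
    · rename_i hne
      obtain ⟨h1, h2, h3⟩ := Prod.mk.injEq .. ▸ h
      cases h; exact ⟨Nat.lt_succ_self m, rfl, hne⟩
    · split at h
      · cases h
      · rename_i hm0
        obtain ⟨hi, hc, hcl⟩ := ih i c h
        exact ⟨Nat.lt_succ_of_lt hi, hc, hcl⟩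

-- folding `set j v` over indices all below a.length acts on the left part of a ++ b,
-- and preserves length
theorem pv_foldl_set_append (v : String) :
    ∀ (js : List Nat) (a b : List String), (∀ j ∈ js, j < a.length) →
      js.foldl (fun cs j => cs.set j v) (a ++ b) =
        (js.foldl (fun cs j => cs.set j v) a) ++ b ∧
      (js.foldl (fun cs j => cs.set j v) a).length = a.length := by
  intro js
  induction js with
  | nil => intro a b _; exact ⟨rfl, rfl⟩
  | cons j t ih =>
    intro a b hj
    have hjl : j < a.length := hj j (List.mem_cons_self ..)
    have hset : (a ++ b).set j v = a.set j v ++ b := List.set_append_left j v hjl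
    have hrec := ih (a.set j v) b (by intro x hx; simpa using hj x (List.mem_cons_of_mem _ hx))
    simp only [List.foldl_cons, hset]
    exact ⟨hrec.1, by simpa using hrec.2⟩

theorem pv_ofList_ne_empty (l : List Char) (c : Char) : String.ofList (l ++ [c]) ≠ "" := by
  simp [String.ofList_eq_empty_iff]

-- pvAScan on a snoc list: one unfolding step
theorem pvAScan_snoc_ne (a : List String) (x last : String) (hx : x ≠ last) :
    pvAScan (a ++ [x]) last (a.length + 1) = (false, a.length, x) := by
  have hg : (a ++ [x]).getD a.length "" = x := by simp [List.getD_eq_getElem?_getD]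
  simp only [pvAScan, hg]
  simp [hx]

theorem pvAScan_snoc_eq (a : List String) (x last : String) (hx : x = last) (ha : a ≠ []) :
    pvAScan (a ++ [x]) last (a.length + 1) = pvAScan a last a.length := by
  subst hx
  have hg : (a ++ [x]).getD a.length "" = x := by simp [List.getD_eq_getElem?_getD]
  have h0 : a.length ≠ 0 := by
    have := List.length_pos_of_ne_nil ha; omega
  simp only [pvAScan, hg]
  rw [if_neg (by simp), if_neg h0]
  exact pvAScan_append a [x] x a.length le_rfl

theorem pvAScan_single_eq (x last : String) (hx : x = last) :
    pvAScan [x] last 1 = (true, 0, x) := by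
  simp [pvAScan, hx]

-- the key snoc fact about A's port
theorem nextShortLex_snoc (l : List Char) (c : Char) (alphabet : List String) :
    nextShortLex (String.ofList (l ++ [c])) alphabet =
      if String.singleton c ≠ PySem.List.pyGetD alphabet (-1) "" then
        String.ofList l ++
          PySem.List.pyGetD alphabet
            ((((PySem.List.index? alphabet (String.singleton c)).getD 0) + 1 : Nat) : Int) ""
      else nextShortLex (String.ofList l) alphabet ++ PySem.List.pyGetD alphabet 0 "" := by
  have hne : String.ofList (l ++ [c]) ≠ "" := pv_ofList_ne_empty l c
  have hmapL : (String.ofList (l ++ [c])).toList.map (fun c => String.singleton c)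
      = l.map (fun c => String.singleton c) ++ [String.singleton c] := by
    simp
  by_cases hc : String.singleton c = PySem.List.pyGetD alphabet (-1) ""
  · -- carry case: last character equals alphabet[-1]
    rw [if_neg (by simpa using hc)]
    rcases List.eq_nil_or_concat' l with rfl | ⟨l', d, rfl⟩
    · -- l = []: single-character overflow
      have hne1 : String.ofList ([] ++ [c]) ≠ "" := hne
      simp only [nextShortLex]
      rw [if_neg hne1, hmapL]
      simp only [List.map_nil, List.nil_append, List.length_cons, List.length_nil,
        Nat.zero_add, if_true]
      rw [pvAScan_single_eq _ _ hc, if_pos rfl]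
      simp only [List.replicate, String.join, List.foldl_cons, List.foldl_nil,
        String.empty_append]
    · -- l = l' ++ [d]
      have hmapR : (String.ofList (l' ++ [d])).toList.map (fun c => String.singleton c)
          = (l' ++ [d]).map (fun c => String.singleton c) := by simp
      simp only [nextShortLex]
      rw [if_neg hne, if_neg (pv_ofList_ne_empty l' d), hmapL, hmapR]
      have hlen1 : ((l' ++ [d]).map (fun c => String.singleton c) ++ [String.singleton c]).length
          = ((l' ++ [d]).map (fun c => String.singleton c)).length + 1 := by simp
      rw [hlen1]
      set a := (l' ++ [d]).map (fun c => String.singleton c) with ha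
      have haln : a ≠ [] := by simp [ha]
      rw [pvAScan_snoc_eq a _ _ hc haln]
      rcases hscan : pvAScan a (PySem.List.pyGetD alphabet (-1) "") a.length with ⟨ov, i, cc⟩
      cases ov with
      | true =>
        rw [List.replicate_succ' (n := a.length + 1), pv_join_snoc]
        simp only [if_true]
      | false =>
        simp only [Bool.false_eq_true, if_neg (by simp : ¬ False)]
        obtain ⟨hi, -, -⟩ := pvAScan_false a (PySem.List.pyGetD alphabet (-1) "") a.length i cc hscan
        rw [List.set_append_left i _ hi]
        have hr : (a.length + 1) - (i + 1) = (a.length - (i + 1)) + 1 := by omega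
        rw [hr, List.range'_1_concat]
        have hn : (i + 1) + (a.length - (i + 1)) = a.length := by omega
        rw [hn, List.foldl_append]
        obtain ⟨hfold, hlenf⟩ := pv_foldl_set_append (PySem.List.pyGetD alphabet 0 "")
          (List.range' (i+1) (a.length - (i+1)))
          (a.set i (PySem.List.pyGetD alphabet
            ((((PySem.List.index? alphabet cc).getD 0) + 1 : Nat) : Int) ""))
          [String.singleton c]
          (by intro j hj; have := List.mem_range'_1.mp hj; simp only [List.length_set]; omega)
        rw [hfold]
        simp only [List.foldl_cons, List.foldl_nil]
        set X := List.foldl (fun cs j => cs.set j (PySem.List.pyGetD alphabet 0 ""))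
          (a.set i (PySem.List.pyGetD alphabet
            ((((PySem.List.index? alphabet cc).getD 0) + 1 : Nat) : Int) ""))
          (List.range' (i+1) (a.length - (i+1))) with hX
        have hXlen : X.length = a.length := by rw [hlenf, List.length_set]
        have hsetlast : ∀ (Y : List String) (y v : String),
            (Y ++ [y]).set Y.length v = Y ++ [v] := by intro Y y v; simp
        rw [← hXlen, hsetlast, pv_join_snoc]
  · -- increment case
    rw [if_pos hc]
    simp only [nextShortLex]
    rw [if_neg hne, hmapL]
    have hlen1 : (l.map (fun c => String.singleton c) ++ [String.singleton c]).length
        = (l.map (fun c => String.singleton c)).length + 1 := by simp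
    rw [hlen1, pvAScan_snoc_ne _ _ _ hc]
    simp only [Bool.false_eq_true, if_neg (by simp : ¬ False)]
    have hset : ∀ v : String,
        (l.map (fun c => String.singleton c) ++ [String.singleton c]).set
          (l.map (fun c => String.singleton c)).length v
        = l.map (fun c => String.singleton c) ++ [v] := by
      intro v; simp
    rw [hset]
    simp only [Nat.sub_self, List.range'_zero, List.foldl_nil]
    rw [pv_join_snoc, pv_join_singletons]

theorem pvBGo_eq (alphabet : List String) :
    ∀ rl : List Char, pvBGo alphabet rl = nextShortLex (String.ofList rl.reverse) alphabet := by
  intro rl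
  induction rl with
  | nil =>
    simp only [pvBGo, List.reverse_nil]
    simp [nextShortLex, String.ofList_nil]
  | cons c rest ih =>
    simp only [pvBGo, List.reverse_cons]
    rw [nextShortLex_snoc]
    split
    · rfl
    · rw [ih]

-- ===== VERDICT (by name: the statement is the Claim_ definition above) =====
theorem nextShortLex_spec : Claim_equal_nextShortLex := by
  intro s alphabet _ _
  unfold Spec_nextShortLex nextShortLex_alt
  rw [pvBGo_eq, List.reverse_reverse, String.ofList_toList]
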